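-- pv_equiv track=rewrite | github.com/YoungdanNoh/For_Coding_Test | 프로그래머스/2/12913. 땅따먹기/땅따먹기.py | solution
-- ===== SOURCE A (Python) =====
-- def solution(land):
--
--     dp = [land[0]] + [[0]*4 for i in range(len(land)-1)]
--
--     for i in range(1, len(land)):
--         for j in range(4):
--             tmp = 0
--             for k in range(4):
--                 if(k != j):
--                     tmp = max(tmp, dp[i-1][k])
--
--             dp[i][j] = land[i][j] + tmp
--
--     return max(dp[len(land)-1])
-- ===== SOURCE B (Python) =====
-- def solution(land):
--     prev = land[0]
--     for row in land[1:]: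
--         m1 = m2 = 0  # top-two of prev[:4], floored at 0 (A's tmp starts at 0)
--         for v in prev[:4]:
--             if v > m1:
--                 m1, m2 = v, m1
--             elif v > m2:
--                 m2 = v
--         prev = [row[j] + (m2 if prev[j] == m1 else m1) for j in range(4)]
--     return max(prev)
-- ===== Notes on version B (the rewrite author's own statement) =====
-- stated objective: alternative
-- what changed: B drops A's dp table and its per-cell inner scan of the previous row (4x4 reads per land row via nested range loops) and instead carries only the previous dp row, computing its top-two values (floored at 0) in a single scan per row, from which each new cell takes the max value or the second max depending on whether the cell's column holds the maximum.
-- outside the precondition, e.g. on solution([]): A raises IndexError, B raises IndexError; on solution([[1, 2, 3], [4, 5, 6]]): A raises IndexError, B raises IndexError; on solution([[]]): A raises ValueError, B raises ValueError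
import Mathlib
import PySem

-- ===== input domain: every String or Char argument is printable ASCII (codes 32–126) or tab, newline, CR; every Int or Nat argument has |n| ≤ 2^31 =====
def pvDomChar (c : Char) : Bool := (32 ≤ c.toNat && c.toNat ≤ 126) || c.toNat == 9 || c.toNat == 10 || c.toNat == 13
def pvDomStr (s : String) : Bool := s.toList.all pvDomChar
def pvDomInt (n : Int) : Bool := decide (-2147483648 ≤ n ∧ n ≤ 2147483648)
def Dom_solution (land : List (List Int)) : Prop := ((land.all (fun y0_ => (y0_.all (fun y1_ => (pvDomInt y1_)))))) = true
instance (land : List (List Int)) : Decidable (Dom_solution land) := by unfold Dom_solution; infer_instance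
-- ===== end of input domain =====

-- B replaces A's dp table and per-cell inner scan of the previous dp row (4×4 reads
-- per land row) by a single top-two scan of the carried previous row per land row.

-- ===== PORT A =====
def solution (land : List (List Int)) : Int :=
  let dp := [PySem.List.pyGetD land 0 []] ++
    (PySem.List.pyRange 0 ((land.length : Int) - 1) 1).map (fun _ => [0, 0, 0, 0])
  let dp := (PySem.List.pyRange 1 (land.length : Int) 1).foldl (fun dp i =>
    (PySem.List.pyRange 0 4 1).foldl (fun dp j =>
      let tmp := (PySem.List.pyRange 0 4 1).foldl (fun tmp k =>
        if k ≠ j then max tmp (PySem.List.pyGetD (PySem.List.pyGetD dp (i - 1) []) k 0)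
        else tmp) 0
      PySem.List.pySetD dp i
        (PySem.List.pySetD (PySem.List.pyGetD dp i [])
          j (PySem.List.pyGetD (PySem.List.pyGetD land i []) j 0 + tmp))) dp) dp
  (PySem.List.max? (PySem.List.pyGetD dp ((land.length : Int) - 1) []) (fun x => x)).getD 0

-- ===== PORT B =====
def solution_alt (land : List (List Int)) : Int :=
  let prev := PySem.List.pyGetD land 0 []
  let prev := (PySem.List.slice land (some 1) none).foldl (fun prev row =>
    let mm := (PySem.List.slice prev none (some 4)).foldl
      (fun (q : Int × Int) v =>
        if v > q.1 then (v, q.1) else if v > q.2 then (q.1, v) else q) (0, 0)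
    (PySem.List.pyRange 0 4 1).map (fun j =>
      PySem.List.pyGetD row j 0 +
        (if PySem.List.pyGetD prev j 0 = mm.1 then mm.2 else mm.1))) prev
  (PySem.List.max? prev (fun x => x)).getD 0

-- ===== PRECONDITION & SPEC =====
-- Pre_ excludes exactly the inputs on which the Python A raises (IndexError on an
-- empty land or, with several rows, a row shorter than 4; ValueError of max([]) for
-- a single empty row).
def Pre_solution (land : List (List Int)) : Prop :=
  land ≠ [] ∧ (if land.length = 1 then land.headI ≠ [] else ∀ row ∈ land, 4 ≤ row.length)
instance (land : List (List Int)) : Decidable (Pre_solution land) := by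
  unfold Pre_solution; infer_instance

def pvWitness_solution : List (List Int) := [[1, 2, 3, 4], [4, 3, 2, 1], [1, 5, 1, 5]]

def Spec_solution (land : List (List Int)) (out : Int) : Prop := out = solution_alt land
instance (land : List (List Int)) (out : Int) : Decidable (Spec_solution land out) := by
  unfold Spec_solution; infer_instance

-- ===== CLAIM (what is proved, stated in full; the proofs are below) =====
def Claim_equal_solution : Prop :=
  ∀ (land : List (List Int)), Dom_solution land → Pre_solution land →
    Spec_solution land (solution land)

-- ===== LEMMAS AND PROOFS =====

-- A's inner k-loop, abstracted over the previous dp row p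
def tmpA (p : List Int) (j : Int) : Int :=
  (PySem.List.pyRange 0 4 1).foldl
    (fun tmp k => if k ≠ j then max tmp (PySem.List.pyGetD p k 0) else tmp) 0

-- A's whole row i, as a function of the previous dp row p and land row r
def stepA (p r : List Int) : List Int :=
  (PySem.List.pyRange 0 4 1).map (fun j => PySem.List.pyGetD r j 0 + tmpA p j)

-- B's whole row, same shape
def stepB (p r : List Int) : List Int :=
  let mm := (PySem.List.slice p none (some 4)).foldl
    (fun (q : Int × Int) v =>
      if v > q.1 then (v, q.1) else if v > q.2 then (q.1, v) else q) (0, 0)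
  (PySem.List.pyRange 0 4 1).map (fun j =>
    PySem.List.pyGetD r j 0 + (if PySem.List.pyGetD p j 0 = mm.1 then mm.2 else mm.1))

-- A's outer loop, one step
def outerA (land : List (List Int)) (dp : List (List Int)) (i : Int) : List (List Int) :=
  (PySem.List.pyRange 0 4 1).foldl (fun dp j =>
    let tmp := (PySem.List.pyRange 0 4 1).foldl (fun tmp k =>
      if k ≠ j then max tmp (PySem.List.pyGetD (PySem.List.pyGetD dp (i - 1) []) k 0)
      else tmp) 0
    PySem.List.pySetD dp i
      (PySem.List.pySetD (PySem.List.pyGetD dp i [])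
        j (PySem.List.pyGetD (PySem.List.pyGetD land i []) j 0 + tmp))) dp

lemma pyRange04 : PySem.List.pyRange 0 4 1 = [0, 1, 2, 3] := by decide

-- the top-two scan versus the four exclusion maxima
lemma toptwo (a b c d : Int) :
    ∀ mm : Int × Int,
      ([a,b,c,d].foldl (fun (q : Int × Int) v =>
        if v > q.1 then (v, q.1) else if v > q.2 then (q.1, v) else q) ((0:Int), (0:Int))) = mm →
      (if a = mm.1 then mm.2 else mm.1) = max (max (max 0 b) c) d ∧
      (if b = mm.1 then mm.2 else mm.1) = max (max (max 0 a) c) d ∧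
      (if c = mm.1 then mm.2 else mm.1) = max (max (max 0 a) b) d ∧
      (if d = mm.1 then mm.2 else mm.1) = max (max (max 0 a) b) c := by
  rintro ⟨m1, m2⟩ hmm
  rw [List.foldl_cons] at hmm; dsimp only at hmm
  split_ifs at hmm <;>
  · rw [List.foldl_cons] at hmm; dsimp only at hmm
    split_ifs at hmm <;>
    · rw [List.foldl_cons] at hmm; dsimp only at hmm
      split_ifs at hmm <;>
      · rw [List.foldl_cons, List.foldl_nil] at hmm; dsimp only at hmm
        split_ifs at hmm <;>
        · injection hmm with h1 h2; subst h1; subst h2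
          refine ⟨?_, ?_, ?_, ?_⟩ <;> · split_ifs <;> omega

-- the per-row equivalence: top-two scan = per-cell exclusion max
lemma stepA_eq_stepB (p r : List Int) (hp : 4 ≤ p.length) : stepA p r = stepB p r := by
  obtain ⟨a, b, c, d, t, rfl⟩ : ∃ a b c d t, p = a :: b :: c :: d :: t := by
    match p, hp with
    | a :: b :: c :: d :: t, _ => exact ⟨a, b, c, d, t, rfl⟩
  have hs : PySem.List.slice (a :: b :: c :: d :: t) none (some 4) = [a, b, c, d] := by
    simp [PySem.List.slice_to]
  have hg0 : PySem.List.pyGetD (a :: b :: c :: d :: t) (0:Int) 0 = a := by simp [PySem.List.pyGetD_ofNat']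
  have hg1 : PySem.List.pyGetD (a :: b :: c :: d :: t) (1:Int) 0 = b := by simp [PySem.List.pyGetD_ofNat']
  have hg2 : PySem.List.pyGetD (a :: b :: c :: d :: t) (2:Int) 0 = c := by simp [PySem.List.pyGetD_ofNat']
  have hg3 : PySem.List.pyGetD (a :: b :: c :: d :: t) (3:Int) 0 = d := by simp [PySem.List.pyGetD_ofNat']
  have h0 : tmpA (a :: b :: c :: d :: t) 0 = max (max (max 0 b) c) d := by
    simp [tmpA, pyRange04, hg1, hg2, hg3]
  have h1 : tmpA (a :: b :: c :: d :: t) 1 = max (max (max 0 a) c) d := by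
    simp [tmpA, pyRange04, hg0, hg2, hg3]
  have h2 : tmpA (a :: b :: c :: d :: t) 2 = max (max (max 0 a) b) d := by
    simp [tmpA, pyRange04, hg0, hg1, hg3]
  have h3 : tmpA (a :: b :: c :: d :: t) 3 = max (max (max 0 a) b) c := by
    simp [tmpA, pyRange04, hg0, hg1, hg2]
  simp only [stepA, stepB, pyRange04, hs, List.map, h0, h1, h2, h3, hg0, hg1, hg2, hg3]
  generalize hmm : ([a,b,c,d].foldl (fun (q : Int × Int) v =>
      if v > q.1 then (v, q.1) else if v > q.2 then (q.1, v) else q) ((0:Int), (0:Int))) = mm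
  obtain ⟨e0, e1, e2, e3⟩ := toptwo a b c d mm hmm
  rw [e0, e1, e2, e3]

lemma length_stepB (p r : List Int) : (stepB p r).length = 4 := by
  simp [stepB, pyRange04]

lemma foldl_stepA_eq_stepB (rows : List (List Int)) :
    ∀ p : List Int, 4 ≤ p.length → rows.foldl stepA p = rows.foldl stepB p := by
  induction rows with
  | nil => intro p _; rfl
  | cons r rs ih =>
      intro p hp
      simp only [List.foldl_cons, stepA_eq_stepB p r hp]
      exact ih _ (by rw [length_stepB])

lemma ps0 (x0 x1 x2 x3 v : Int) : PySem.List.pySetD [x0,x1,x2,x3] 0 v = [v,x1,x2,x3] := rfl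
lemma ps1 (x0 x1 x2 x3 v : Int) : PySem.List.pySetD [x0,x1,x2,x3] 1 v = [x0,v,x2,x3] := rfl
lemma ps2 (x0 x1 x2 x3 v : Int) : PySem.List.pySetD [x0,x1,x2,x3] 2 v = [x0,x1,v,x3] := rfl
lemma ps3 (x0 x1 x2 x3 v : Int) : PySem.List.pySetD [x0,x1,x2,x3] 3 v = [x0,x1,x2,v] := rfl

lemma getD_set_self {α : Type} [Inhabited α] (xs : List α) (n : Nat) (v d : α)
    (h : n < xs.length) : (xs.set n v).getD n d = v := by
  simp [List.getD, h]

lemma getD_set_ne {α : Type} [Inhabited α] (xs : List α) (n m : Nat) (v d : α)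
    (h : m ≠ n) : (xs.set n v).getD m d = xs.getD m d := by
  simp [List.getD, List.getElem?_set_ne (by omega : n ≠ m)]

lemma outerA_step (land : List (List Int)) (dp : List (List Int)) (mm : Nat)
    (h2 : mm + 1 < dp.length)
    (hz : PySem.List.pyGetD dp ((mm + 1 : Nat) : Int) [] = [0, 0, 0, 0]) :
    outerA land dp ((mm + 1 : Nat) : Int) =
      dp.set (mm + 1) (stepA (PySem.List.pyGetD dp (((mm + 1 : Nat) : Int) - 1) [])
        (PySem.List.pyGetD land ((mm + 1 : Nat) : Int) [])) := by
  have hm1 : (((mm + 1 : Nat) : Int)) - 1 = ((mm : Nat) : Int) := by push_cast; ring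
  have htmp : ∀ (dp' : List (List Int)) (j : Int),
      (PySem.List.pyRange 0 4 1).foldl (fun tmp k =>
        if k ≠ j then max tmp (PySem.List.pyGetD (PySem.List.pyGetD dp' (((mm + 1 : Nat) : Int) - 1) []) k 0)
        else tmp) 0 = tmpA (PySem.List.pyGetD dp' (((mm + 1 : Nat) : Int) - 1) []) j :=
    fun _ _ => rfl
  simp only [outerA, htmp]
  simp only [pyRange04, List.foldl_cons, List.foldl_nil]
  simp only [hm1, PySem.List.pySetD_natCast, PySem.List.pyGetD_natCast, List.set_set]
  have hz' : dp.getD (mm + 1) [] = [0, 0, 0, 0] := by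
    rw [← PySem.List.pyGetD_natCast]; exact hz
  simp only [hz']
  simp only [getD_set_self _ _ _ _ h2, getD_set_ne _ _ _ _ _ (by omega : mm ≠ mm + 1),
    ps0, ps1, ps2, ps3]
  simp only [stepA, pyRange04, List.map]

lemma loopA (land : List (List Int)) :
    ∀ (t m : Nat) (dp : List (List Int)), m + t = land.length → 1 ≤ m →
    dp.length = land.length →
    (∀ i : Nat, m ≤ i → i < land.length → PySem.List.pyGetD dp (i : Int) [] = [0, 0, 0, 0]) →
    PySem.List.pyGetD
        ((PySem.List.pyRange (m : Int) (land.length : Int) 1).foldl (outerA land) dp)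
        ((land.length : Int) - 1) [] =
      (land.drop m).foldl stepA (PySem.List.pyGetD dp ((m : Int) - 1) []) := by
  intro t
  induction t with
  | zero =>
      intro m dp hmt _ _ _
      have hm : m = land.length := by omega
      subst hm
      rw [PySem.List.pyRange_one_eq_nil le_rfl, List.foldl_nil,
        List.drop_length, List.foldl_nil]
  | succ t ih =>
      intro m dp hmt hm hlen hzeros
      obtain ⟨mm, rfl⟩ : ∃ mm, m = mm + 1 := ⟨m - 1, by omega⟩
      have hmn : ((mm + 1 : Nat) : Int) < (land.length : Int) := by
        exact_mod_cast (by omega : mm + 1 < land.length)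
      rw [PySem.List.pyRange_one_cons hmn, List.foldl_cons]
      rw [outerA_step land dp mm (by omega) (hzeros (mm + 1) le_rfl (by omega))]
      have hcast : ((mm + 1 : Nat) : Int) + 1 = ((mm + 2 : Nat) : Int) := by push_cast; ring
      rw [hcast]
      have hres := ih (mm + 2)
        (dp.set (mm + 1) (stepA (PySem.List.pyGetD dp (((mm + 1 : Nat) : Int) - 1) [])
          (PySem.List.pyGetD land ((mm + 1 : Nat) : Int) [])))
        (by omega) (by omega) (by simpa using hlen)
        (by
          intro i hi hin
          rw [PySem.List.pyGetD_natCast, getD_set_ne _ _ _ _ _ (by omega : i ≠ mm + 1),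
            ← PySem.List.pyGetD_natCast]
          exact hzeros i (by omega) hin)
      rw [hres]
      have hget : PySem.List.pyGetD
          (dp.set (mm + 1) (stepA (PySem.List.pyGetD dp (((mm + 1 : Nat) : Int) - 1) [])
            (PySem.List.pyGetD land ((mm + 1 : Nat) : Int) [])))
          (((mm + 2 : Nat) : Int) - 1) [] =
          stepA (PySem.List.pyGetD dp (((mm + 1 : Nat) : Int) - 1) [])
            (PySem.List.pyGetD land ((mm + 1 : Nat) : Int) []) := by
        have : (((mm + 2 : Nat) : Int)) - 1 = ((mm + 1 : Nat) : Int) := by push_cast; ring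
        rw [this, PySem.List.pyGetD_natCast]
        exact getD_set_self _ _ _ _ (by omega)
      rw [hget]
      have hdrop : land.drop (mm + 1) =
          PySem.List.pyGetD land ((mm + 1 : Nat) : Int) [] :: land.drop (mm + 2) := by
        rw [PySem.List.pyGetD_natCast]
        rw [List.drop_eq_getElem_cons (by omega : mm + 1 < land.length)]
        congr 1
        rw [List.getD, List.getElem?_eq_getElem (by omega : mm + 1 < land.length)]
        rfl
      rw [hdrop, List.foldl_cons]

lemma dp0_zeros (land : List (List Int)) (i : Nat) (h1 : 1 ≤ i) (h2 : i < land.length) :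
    PySem.List.pyGetD
      ([PySem.List.pyGetD land 0 []] ++
        (PySem.List.pyRange 0 ((land.length : Int) - 1) 1).map (fun _ => [0, 0, 0, 0]))
      (i : Int) [] = ([0, 0, 0, 0] : List Int) := by
  rw [PySem.List.pyGetD_natCast]
  have hlen : ((PySem.List.pyRange 0 ((land.length : Int) - 1) 1).map
      (fun _ => ([0, 0, 0, 0] : List Int))).length = land.length - 1 := by
    simp [PySem.List.length_pyRange_one]
  rw [List.getD, List.getElem?_append_right (by simpa using h1)]
  simp only [List.length_cons, List.length_nil]
  rw [List.getElem?_eq_getElem (by omega : i - 1 < ((PySem.List.pyRange 0 ((land.length : Int) - 1) 1).map (fun _ => ([0, 0, 0, 0] : List Int))).length)]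
  simp

theorem solution_eq_alt (land : List (List Int)) (hpre : Pre_solution land) :
    solution land = solution_alt land := by
  obtain ⟨hne, hrows⟩ := hpre
  match land, hne with
  | [r0], _ =>
      show solution [r0] = solution_alt [r0]
      simp [solution, solution_alt, PySem.List.pyRange_one_eq_nil,
        PySem.List.slice_from_one]
  | r0 :: r1 :: rest, _ =>
      set land := r0 :: r1 :: rest with hland
      have hn2 : 2 ≤ land.length := by simp [hland]
      have h4 : ∀ row ∈ land, 4 ≤ row.length := by
        have : land.length ≠ 1 := by omega
        simpa [this] using hrows
      have hA : solution land =
          (PySem.List.max?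
            (PySem.List.pyGetD
              ((PySem.List.pyRange 1 (land.length : Int) 1).foldl (outerA land)
                ([PySem.List.pyGetD land 0 []] ++
                  (PySem.List.pyRange 0 ((land.length : Int) - 1) 1).map (fun _ => [0, 0, 0, 0])))
              ((land.length : Int) - 1) []) (fun x => x)).getD 0 := rfl
      have hB : solution_alt land =
          (PySem.List.max?
            ((PySem.List.slice land (some 1) none).foldl stepB (PySem.List.pyGetD land 0 []))
            (fun x => x)).getD 0 := rfl
      have hres := loopA land (land.length - 1) 1
        ([PySem.List.pyGetD land 0 []] ++
          (PySem.List.pyRange 0 ((land.length : Int) - 1) 1).map (fun _ => [0, 0, 0, 0]))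
        (by omega) le_rfl
        (by simp [PySem.List.length_pyRange_one]; omega)
        (fun i hi hin => dp0_zeros land i hi hin)
      rw [Nat.cast_one] at hres
      have hstart : PySem.List.pyGetD
          ([PySem.List.pyGetD land 0 []] ++
            (PySem.List.pyRange 0 ((land.length : Int) - 1) 1).map (fun _ => [0, 0, 0, 0]))
          ((1 : Int) - 1) [] = PySem.List.pyGetD land 0 [] := by norm_num
      rw [hstart] at hres
      have hhead : PySem.List.pyGetD land 0 [] = r0 := by
        simp [hland, PySem.List.pyGetD_ofNat']
      have hfold : (land.drop 1).foldl stepA (PySem.List.pyGetD land 0 []) =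
          (land.drop 1).foldl stepB (PySem.List.pyGetD land 0 []) := by
        apply foldl_stepA_eq_stepB
        rw [hhead]
        exact h4 r0 (by simp [hland])
      have hslice : PySem.List.slice land (some 1) none = land.drop 1 := by
        rw [PySem.List.slice_from_one, ← List.drop_one]
      rw [hA, hB, hres, hfold, hslice]

-- ===== VERDICT (by name: the statement is the Claim_ definition above) =====
theorem solution_spec : Claim_equal_solution := by
  intro land _ hpre
  exact solution_eq_alt land hpre
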